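-- pv_equiv track=rewrite | github.com/DavidMCKim/TIL | 211231 TIL/baekjoon/6588_골드바흐의 추측.py | find_sosu
-- ===== SOURCE A (Python) =====
-- def find_sosu(num):
--     yaksu_list = []
--     sosu_list = []
--     for _ in range(2,num+1):
--         for x in range(1,_+1):
--             if _%x == 0:
--                 yaksu_list.append(x)
--         if len(yaksu_list) <= 2:
--             if _%2 != 0:
--                 sosu_list.append(_)
--         yaksu_list = []
--     return sosu_list
-- ===== SOURCE B (Python) =====
-- def find_sosu(num):
--     sosu_list = []
--     for n in range(3, num + 1, 2):
--         if all(n % d != 0 for d in range(3, n, 2)):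
--             sosu_list.append(n)
--     return sosu_list
-- ===== Notes on version B (the rewrite author's own statement) =====
-- stated objective: faster
-- what changed: Instead of building the full divisor list of every candidate and counting it, B walks only the odd candidates and tests each against only odd trial divisors with an early-exit all(), appending when none divides.
import Mathlib
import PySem

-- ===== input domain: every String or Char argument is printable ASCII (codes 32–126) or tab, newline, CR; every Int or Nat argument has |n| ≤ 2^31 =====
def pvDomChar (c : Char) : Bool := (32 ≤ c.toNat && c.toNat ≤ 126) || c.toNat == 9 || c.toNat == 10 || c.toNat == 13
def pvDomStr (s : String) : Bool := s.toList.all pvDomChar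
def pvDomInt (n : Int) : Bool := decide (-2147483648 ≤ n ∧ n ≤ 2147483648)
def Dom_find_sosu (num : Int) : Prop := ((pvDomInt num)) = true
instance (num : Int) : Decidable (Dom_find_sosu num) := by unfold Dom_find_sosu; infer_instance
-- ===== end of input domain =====

-- B replaces A's build-and-count of every divisor of every n in 2..num by odd-only trial
-- division with an early-exit all() over odd candidates (objective: faster).


-- ===== PORT A =====
-- transliteration of A: for each _ in range(2, num+1) collect the divisor list
-- (yaksu_list, rebuilt from [] each iteration), append _ when it has ≤ 2 entries and _ is odd
def find_sosu (num : Int) : List Int :=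
  (PySem.List.pyRange 2 (num + 1) 1).foldl
    (fun sosu_list n =>
      let yaksu_list :=
        (PySem.List.pyRange 1 (n + 1) 1).foldl
          (fun acc x => if PySem.Int.mod n x == 0 then acc ++ [x] else acc) []
      if PySem.List.len yaksu_list ≤ 2 then
        if PySem.Int.mod n 2 ≠ 0 then sosu_list ++ [n] else sosu_list
      else sosu_list)
    []

-- ===== PORT B =====
-- transliteration of B: odd candidates, odd trial divisors, early-exit all()
def find_sosu_alt (num : Int) : List Int :=
  (PySem.List.pyRange 3 (num + 1) 2).foldl
    (fun sosu_list n =>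
      if (PySem.List.pyRange 3 n 2).all (fun d => PySem.Int.mod n d != 0) then
        sosu_list ++ [n]
      else sosu_list)
    []

-- ===== PRECONDITION & SPEC =====
def Spec_find_sosu (num : Int) (out : List Int) : Prop := out = find_sosu_alt num
instance (num : Int) (out : List Int) : Decidable (Spec_find_sosu num out) := by unfold Spec_find_sosu; infer_instance

-- ===== CLAIM (what is proved, stated in full; the proofs are below) =====
def Claim_equal_find_sosu : Prop := ∀ (num : Int), Dom_find_sosu num → Spec_find_sosu num (find_sosu num)

-- ===== LEMMAS AND PROOFS =====

-- A's divisor list of n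
def pvDivs (n : Int) : List Int :=
  (PySem.List.pyRange 1 (n + 1) 1).filter (fun x => PySem.Int.mod n x == 0)

lemma mem_pvDivs (n x : Int) : x ∈ pvDivs n ↔ (1 ≤ x ∧ x ≤ n) ∧ x ∣ n := by
  rw [pvDivs, List.mem_filter, PySem.List.mem_pyRange_one, beq_iff_eq,
    PySem.Int.mod_eq_zero_iff_dvd]
  constructor
  · rintro ⟨⟨a, b⟩, c⟩; exact ⟨⟨a, by omega⟩, c⟩
  · rintro ⟨⟨a, b⟩, c⟩; exact ⟨⟨a, by omega⟩, c⟩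

-- A as a filter over range(2, num+1)
lemma find_sosu_eq_filter (num : Int) :
    find_sosu num = (PySem.List.pyRange 2 (num + 1) 1).filter
      (fun n => decide (PySem.List.len (pvDivs n) ≤ 2) && (PySem.Int.mod n 2 != 0)) := by
  unfold find_sosu
  rw [PySem.List.foldl_congr_mem (g := fun sosu_list n =>
    if (decide (PySem.List.len (pvDivs n) ≤ 2) && (PySem.Int.mod n 2 != 0)) = true
    then sosu_list ++ [n] else sosu_list)]
  · rw [PySem.List.foldl_append_if_eq_filter]; simp
  · intro acc n _
    simp only [pvDivs, PySem.List.foldl_append_if_eq_filter, List.nil_append,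
      Bool.and_eq_true, decide_eq_true_iff, bne_iff_ne, ne_eq]
    split_ifs <;> tauto

-- B as a filter over range(3, num+1, 2)
lemma find_sosu_alt_eq_filter (num : Int) :
    find_sosu_alt num = (PySem.List.pyRange 3 (num + 1) 2).filter
      (fun n => (PySem.List.pyRange 3 n 2).all (fun d => PySem.Int.mod n d != 0)) := by
  unfold find_sosu_alt
  rw [PySem.List.foldl_append_if_eq_filter]; simp

-- the odd elements of range(2, m) are exactly range(3, m, 2)
lemma filter_odd_pyRange (m : Int) :
    (PySem.List.pyRange 2 m 1).filter (fun n => PySem.Int.mod n 2 != 0)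
      = PySem.List.pyRange 3 m 2 := by
  have h1 : ((PySem.List.pyRange 2 m 1).filter (fun n => PySem.Int.mod n 2 != 0)).Pairwise (· < ·) :=
    (PySem.List.pairwise_lt_pyRange_one 2 m).sublist (List.filter_sublist)
  have h2 : (PySem.List.pyRange 3 m 2).Pairwise (· < ·) := by
    rw [PySem.List.pyRange_of_pos 3 m (by norm_num)]
    exact (List.pairwise_map.2 (List.pairwise_lt_range.imp (by intro a b hab; omega)))
  have hmem : ∀ x, x ∈ (PySem.List.pyRange 2 m 1).filter (fun n => PySem.Int.mod n 2 != 0)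
      ↔ x ∈ PySem.List.pyRange 3 m 2 := by
    intro x
    rw [List.mem_filter, PySem.List.mem_pyRange_one,
      PySem.List.mem_pyRange_iff_of_pos (by norm_num)]
    rw [bne_iff_ne, ne_eq, PySem.Int.mod_eq_emod_of_pos (by norm_num)]
    constructor
    · rintro ⟨⟨ha, hb⟩, hc⟩; exact ⟨by omega, hb, by omega⟩
    · rintro ⟨ha, hb, hc⟩; exact ⟨⟨by omega, hb⟩, by omega⟩
  exact List.Perm.eq_of_pairwise (fun a b _ _ hab hba => by omega) h1 h2
    (List.perm_of_nodup_nodup_toFinset_eq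
      (h1.imp ne_of_lt) (h2.imp ne_of_lt)
      (Finset.ext fun x => by simp only [List.mem_toFinset]; exact hmem x))

-- pointwise: for odd n ≥ 3, "≤ 2 divisors" = "no odd trial divisor"
lemma pointwise (n : Int) (h3 : 3 ≤ n) (hodd : PySem.Int.mod n 2 ≠ 0) :
    (decide (PySem.List.len (pvDivs n) ≤ 2))
      = (PySem.List.pyRange 3 n 2).all (fun d => PySem.Int.mod n d != 0) := by
  have hodd' : ¬ (2 : Int) ∣ n := by
    rw [← PySem.Int.mod_eq_zero_iff_dvd]; exact hodd
  have hnd : (pvDivs n).Nodup :=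
    ((PySem.List.nodup_pyRange_one 1 (n+1)).filter _)
  rw [Bool.eq_iff_iff, decide_eq_true_iff, List.all_eq_true]
  simp only [PySem.List.len_eq, PySem.List.mem_pyRange_iff_of_pos (by norm_num : (0:Int) < 2),
    bne_iff_ne, ne_eq, PySem.Int.mod_eq_zero_iff_dvd]
  constructor
  · -- few divisors → no odd trial divisor
    intro hlen d hd hdvd
    obtain ⟨hd3, hdn, -⟩ := hd
    have h1 : (1:Int) ∈ pvDivs n := (mem_pvDivs n 1).2 ⟨⟨le_refl 1, by omega⟩, one_dvd n⟩
    have hdm : d ∈ pvDivs n := (mem_pvDivs n d).2 ⟨⟨by omega, Int.le_of_dvd (by omega) hdvd⟩, hdvd⟩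
    have hnm : n ∈ pvDivs n := (mem_pvDivs n n).2 ⟨⟨by omega, le_refl n⟩, dvd_refl n⟩
    have hsub : ({1, d, n} : Finset ℤ) ⊆ (pvDivs n).toFinset := by
      intro x hx
      simp only [Finset.mem_insert, Finset.mem_singleton] at hx
      rcases hx with rfl | rfl | rfl <;> simp [List.mem_toFinset, h1, hdm, hnm]
    have hcard : ({1, d, n} : Finset ℤ).card = 3 := by
      rw [Finset.card_insert_of_notMem (by simp; omega),
        Finset.card_insert_of_notMem (by simp; omega), Finset.card_singleton]
    have := Finset.card_le_card hsub
    rw [List.toFinset_card_of_nodup hnd, hcard] at this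
    omega
  · -- no odd trial divisor → every divisor is 1 or n
    intro hall
    have hsub : (pvDivs n).toFinset ⊆ ({1, n} : Finset ℤ) := by
      intro x hx
      rw [List.mem_toFinset, mem_pvDivs] at hx
      obtain ⟨⟨hx1, hxn⟩, hxdvd⟩ := hx
      simp only [Finset.mem_insert, Finset.mem_singleton]
      by_contra hne
      push Not at hne
      have hxodd : ¬ (2:Int) ∣ x := fun h => hodd' (h.trans hxdvd)
      exact hall x ⟨by omega, by omega, by omega⟩ hxdvd
    have := Finset.card_le_card hsub
    rw [List.toFinset_card_of_nodup hnd] at this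
    have h2 : ({1, n} : Finset ℤ).card ≤ 2 :=
      (Finset.card_insert_le _ _).trans (by simp)
    omega

-- ===== VERDICT (by name: the statement is the Claim_ definition above) =====
theorem find_sosu_spec : Claim_equal_find_sosu := by
  intro num _
  show find_sosu num = find_sosu_alt num
  rw [find_sosu_eq_filter, find_sosu_alt_eq_filter]
  rw [← List.filter_filter, filter_odd_pyRange]
  apply List.filter_congr
  intro n hn
  have hmem := (PySem.List.mem_pyRange_iff_of_pos (by norm_num) n).1 hn
  exact pointwise n hmem.1 (by
    rcases hmem.2.2 with ⟨k, hk⟩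
    rw [PySem.Int.mod_eq_emod_of_pos (by norm_num)]
    omega)
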